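-- pv_equiv track=rewrite | github.com/sonmh79/Generic-Algorithm-with-Pyqt5 | ga.py | split_trip
-- ===== SOURCE A (Python) =====
-- def split_trip(trip):
--
--     """ Split Trip to Trips """
--
--     stack = 0
--     trips = []
--     t = [0]
--     for node in trip:
--         if node == 0:
--             stack += 1
--         else:
--             t.append(node)
--         if stack == 2:
--             stack = 1
--             t.append(0)
--             trips.append(t)
--             t = [0]
--     return trips
-- ===== SOURCE B (Python) =====
-- def split_trip(trip):
--     """ Split Trip to Trips """
--     # Two-pass: first split the route into segments between zeros,
--     # then assemble each trip as [0] + segment + [0] (the leading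
--     # segment before the first zero is merged into the first trip).
--     segs = []
--     cur = []
--     for n in trip:
--         if n == 0:
--             segs.append(cur)
--             cur = []
--         else:
--             cur.append(n)
--     # nodes after the last zero (cur) never close a trip and are dropped
--     if len(segs) < 2:
--         return []
--     first = [0] + segs[0] + segs[1] + [0]
--     return [first] + [[0] + s + [0] for s in segs[2:]]
-- ===== Notes on version B (the rewrite author's own statement) =====
-- stated objective: alternative
-- what changed: Replaces A's single pass with a stateful zero-counter and trip buffer by a two-pass decomposition: first split the route into the segments lying between zeros, then assemble each trip by wrapping a segment in boundary zeros, merging the segment before the first zero into the first trip.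
import Mathlib
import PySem

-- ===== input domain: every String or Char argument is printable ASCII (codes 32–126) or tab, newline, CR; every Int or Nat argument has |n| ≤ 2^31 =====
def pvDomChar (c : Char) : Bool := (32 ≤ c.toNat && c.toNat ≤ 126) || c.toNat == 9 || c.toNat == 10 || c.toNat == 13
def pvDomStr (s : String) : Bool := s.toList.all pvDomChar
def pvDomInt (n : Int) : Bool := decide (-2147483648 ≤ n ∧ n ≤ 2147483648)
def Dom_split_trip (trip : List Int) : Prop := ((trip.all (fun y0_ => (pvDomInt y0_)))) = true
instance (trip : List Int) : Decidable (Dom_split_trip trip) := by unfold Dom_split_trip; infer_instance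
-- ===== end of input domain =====

-- B replaces A's stateful zero-counter single pass by a two-pass split-into-segments-then-assemble decomposition (alternative, same cost).

-- ===== PORT A =====
-- one loop step of A: update (stack, trips, t) for one node
def stepA (st : Int × List (List Int) × List Int) (node : Int) :
    Int × List (List Int) × List Int :=
  let stack := st.1
  let trips := st.2.1
  let t := st.2.2
  -- if node == 0: stack += 1  else: t.append(node)
  let stack' := if node == 0 then stack + 1 else stack
  let t' := if node == 0 then t else t ++ [node]
  -- if stack == 2: stack = 1; t.append(0); trips.append(t); t = [0]
  if stack' == 2 then (1, trips ++ [t' ++ [0]], ([0] : List Int))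
  else (stack', trips, t')

def split_trip (trip : List Int) : List (List Int) :=
  (trip.foldl stepA (0, [], [0])).2.1

-- ===== PORT B =====
-- one loop step of B: (segs, cur) for one node
def stepB (st : List (List Int) × List Int) (n : Int) : List (List Int) × List Int :=
  if n == 0 then (st.1 ++ [st.2], ([] : List Int)) else (st.1, st.2 ++ [n])

def split_trip_alt (trip : List Int) : List (List Int) :=
  let segs := (trip.foldl stepB ([], [])).1
  match segs with
  | s0 :: s1 :: rest =>
      (([0] ++ s0 ++ s1 ++ [0]) : List Int) :: rest.map (fun s => [0] ++ s ++ [0])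
  | _ => []   -- len(segs) < 2

-- ===== PRECONDITION & SPEC =====
def Spec_split_trip (trip : List Int) (out : List (List Int)) : Prop := out = split_trip_alt trip
instance (trip : List Int) (out : List (List Int)) : Decidable (Spec_split_trip trip out) := by unfold Spec_split_trip; infer_instance

-- ===== CLAIM (what is proved, stated in full; the proofs are below) =====
def Claim_equal_split_trip : Prop := ∀ (trip : List Int), Dom_split_trip trip → Spec_split_trip trip (split_trip trip)

-- ===== LEMMAS AND PROOFS =====

-- recursive reading of A's loop: `emitting` = (stack == 1), t = current trip buffer
def runA (emitting : Bool) (t : List Int) : List Int → List (List Int)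
  | [] => []
  | n :: rest =>
      if n = 0 then
        if emitting then (t ++ [0]) :: runA true [0] rest else runA true t rest
      else runA emitting (t ++ [n]) rest

-- recursive reading of B's first pass: segments between zeros, cur = current segment
def segsOf (c : List Int) : List Int → List (List Int)
  | [] => []
  | n :: rest => if n = 0 then c :: segsOf [] rest else segsOf (c ++ [n]) rest

theorem foldA_eq (l : List Int) : ∀ (trips : List (List Int)) (t : List Int),
    ((l.foldl stepA (0, trips, t)).2.1 = trips ++ runA false t l) ∧
    ((l.foldl stepA (1, trips, t)).2.1 = trips ++ runA true t l) := by
  induction l with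
  | nil => intro trips t; simp [runA]
  | cons n rest ih =>
    intro trips t
    by_cases hn : n = 0
    · constructor
      · simpa [hn, stepA, runA] using (ih trips t).2
      · have h := (ih (trips ++ [t ++ [0]]) [0]).2
        rw [List.append_assoc] at h
        simpa [hn, stepA, runA] using h
    · constructor
      · simpa [hn, stepA, runA] using (ih trips (t ++ [n])).1
      · simpa [hn, stepA, runA] using (ih trips (t ++ [n])).2

theorem foldB_eq (l : List Int) : ∀ (segs : List (List Int)) (c : List Int),
    (l.foldl stepB (segs, c)).1 = segs ++ segsOf c l := by
  induction l with
  | nil => intro segs c; simp [segsOf]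
  | cons n rest ih =>
    intro segs c
    by_cases hn : n = 0 <;> simp [hn, stepB, segsOf, ih]

theorem runA_true (l : List Int) : ∀ (d c : List Int),
    runA true ((0 : Int) :: (d ++ c)) l =
      match segsOf c l with
      | [] => []
      | s :: r => (((0 : Int) :: (d ++ s)) ++ [0]) :: r.map (fun s => [0] ++ s ++ [0]) := by
  induction l with
  | nil => intro d c; simp [runA, segsOf]
  | cons n rest ih =>
    intro d c
    by_cases hn : n = 0
    · have h0 := ih [] []
      simp only [List.nil_append, List.append_nil] at h0
      simp only [hn, runA, segsOf]
      rw [h0]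
      cases hs : segsOf [] rest <;> simp
    · have h := ih d (c ++ [n])
      simp only [hn, runA, segsOf]
      rw [← List.append_assoc] at h
      exact h

theorem runA_false (l : List Int) : ∀ (c : List Int),
    runA false ((0 : Int) :: c) l =
      (match segsOf c l with
       | s0 :: s1 :: rest =>
           (([0] ++ s0 ++ s1 ++ [0]) : List Int) :: rest.map (fun s => [0] ++ s ++ [0])
       | _ => []) := by
  induction l with
  | nil => intro c; simp [runA, segsOf]
  | cons n rest ih =>
    intro c
    by_cases hn : n = 0
    · have h := runA_true rest c []
      simp only [List.append_nil] at h
      simp only [hn, runA, segsOf]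
      rw [h]
      cases hs : segsOf [] rest <;> simp
    · have h := ih (c ++ [n])
      simp only [hn, runA, segsOf]
      exact h

-- ===== VERDICT (by name: the statement is the Claim_ definition above) =====
theorem split_trip_spec : Claim_equal_split_trip := by
  intro trip _
  unfold Spec_split_trip split_trip split_trip_alt
  have hA := (foldA_eq trip [] [0]).1
  have hB := foldB_eq trip [] []
  simp only [List.nil_append] at hA hB
  rw [hA, hB]
  have := runA_false trip []
  simpa using this
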